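-- pv_equiv track=rewrite | github.com/SujitKumarDatta2002/Academic_CSE | CSE220/Fall2022 Lab Q&A/Lab_01.py | repetition
-- ===== SOURCE A (Python) =====
-- def repetition(source):
--
--     # newList = []
--     # first = source[0]
--     # count = 0
--     # for i in source:
--     #     if i == first:
--     #         count += 1
--     #     else:
--     #         first = i
--     #         count = 1
--     #     newList.append(count)
--     mydict = {}
--     for i in source:
--         if i not in mydict:
--             mydict[i] = 1
--         else:
--             mydict[i] += 1
--
--     total = []
--     for j in mydict.values():
--         if j > 1:
--             total.append(j)
--     if len(total) == len(set(total)):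
--         return False
--     else:
--         return True
-- ===== SOURCE B (Python) =====
-- def repetition(source):
--     freq = {}
--     for i in source:
--         freq[i] = freq.get(i, 0) + 1
--     total = sorted(v for v in freq.values() if v > 1)
--     prev = None
--     for v in total:
--         if v == prev:
--             return True
--         prev = v
--     return False
-- ===== Notes on version B (the rewrite author's own statement) =====
-- stated objective: alternative
-- what changed: Duplicate detection among the repeated-frequency values is done by sorting them and scanning once for two equal adjacent entries, instead of A's comparison of the list length with the length of its set.
import Mathlib
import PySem

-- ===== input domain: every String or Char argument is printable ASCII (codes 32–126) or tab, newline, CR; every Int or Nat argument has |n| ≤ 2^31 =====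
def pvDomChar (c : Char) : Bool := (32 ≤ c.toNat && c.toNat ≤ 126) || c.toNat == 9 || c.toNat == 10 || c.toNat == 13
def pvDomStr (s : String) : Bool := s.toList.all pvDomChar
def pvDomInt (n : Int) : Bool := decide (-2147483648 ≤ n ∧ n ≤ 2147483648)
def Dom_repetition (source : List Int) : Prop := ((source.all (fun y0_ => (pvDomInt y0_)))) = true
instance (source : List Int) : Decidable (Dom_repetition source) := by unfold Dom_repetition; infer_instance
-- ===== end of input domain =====

-- B replaces A's len(list)==len(set) duplicate test on the repeated-frequency values by sort + one adjacent-equality scan (alternative decomposition, same result).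


-- ===== PORT A =====
def repetition (source : List Int) : Bool :=
  let mydict : PySem.Dict Int Int :=
    source.foldl
      (fun d i => if d.contains i = false then d.insert i 1 else d.modify i 0 (· + 1))
      PySem.Dict.empty
  let total : List Int :=
    mydict.values.foldl (fun acc j => if j > 1 then acc ++ [j] else acc) []
  if total.length = (PySem.Set.ofList total).length then false else true

-- ===== PORT B =====
-- the 'prev = None; for v in total: if v == prev: return True; prev = v' scan of Source B
def adjScan (l : List Int) (prev : Option Int) : Bool :=
  match l with
  | [] => false
  | v :: rest => if some v = prev then true else adjScan rest (some v)

def repetition_alt (source : List Int) : Bool :=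
  let freq : PySem.Dict Int Int :=
    source.foldl (fun d i => d.insert i (d.getD i 0 + 1)) PySem.Dict.empty
  let total : List Int :=
    PySem.List.sorted (freq.values.filter (fun v => v > 1)) (fun x => x) false
  adjScan total none

-- ===== PRECONDITION & SPEC =====
def Spec_repetition (source : List Int) (out : Bool) : Prop := out = repetition_alt source
instance (source : List Int) (out : Bool) : Decidable (Spec_repetition source out) := by unfold Spec_repetition; infer_instance

-- ===== CLAIM (what is proved, stated in full; the proofs are below) =====
def Claim_equal_repetition : Prop := ∀ (source : List Int), Dom_repetition source → Spec_repetition source (repetition source)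

-- ===== LEMMAS AND PROOFS =====

-- A's branching counting step (fresh key ↦ 1, existing key ↦ +1) is exactly the Counter step
lemma stepA_eq_modify (d : PySem.Dict Int Int) (i : Int) :
    (if d.contains i = false then d.insert i 1 else d.modify i 0 (· + 1)) = d.modify i 0 (· + 1) := by
  split_ifs with h
  · simp [PySem.Dict.modify, PySem.Dict.getD_of_not_contains d 0 h]
  · rfl

lemma foldA_eq (l : List Int) : ∀ d : PySem.Dict Int Int,
    l.foldl (fun d i => if d.contains i = false then d.insert i 1 else d.modify i 0 (· + 1)) d
      = l.foldl (fun d i => d.modify i 0 (· + 1)) d := by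
  induction l with
  | nil => intro d; rfl
  | cons x xs ih =>
    intro d
    simp only [List.foldl_cons]
    rw [stepA_eq_modify]
    exact ih _

-- set(t) keeps the first occurrences as a sublist of t
lemma ofList_sublist (t : List Int) : (PySem.Set.ofList t).Sublist t := by
  induction t with
  | nil => simp [PySem.Set.ofList_nil]
  | cons x xs ih =>
    rw [PySem.Set.ofList_cons]
    exact List.Sublist.cons₂ x (List.filter_sublist.trans ih)

-- len(set(t)) == len(t) is exactly "t has no duplicates"
lemma ofList_length_eq_iff_nodup (t : List Int) :
    (PySem.Set.ofList t).length = t.length ↔ t.Nodup := by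
  constructor
  · intro h
    have := (ofList_sublist t).eq_of_length h
    rw [← this]; exact PySem.Set.nodup_ofList t
  · intro h; rw [PySem.Set.ofList_eq_self_of_nodup _ h]

-- the scan with prev = v on a ≤-sorted tail whose elements all dominate v
lemma adjScan_some (l : List Int) : ∀ (v : Int), (∀ x ∈ l, v ≤ x) → l.Pairwise (· ≤ ·) →
    (adjScan l (some v) = true ↔ v ∈ l ∨ ¬ l.Nodup) := by
  induction l with
  | nil => simp [adjScan]
  | cons w rest ih =>
    intro v hle hp
    rcases List.pairwise_cons.mp hp with ⟨hw, hp'⟩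
    by_cases hwv : w = v
    · subst hwv
      simp [adjScan]
    · have step : adjScan (w :: rest) (some v) = adjScan rest (some w) := by
        simp [adjScan, hwv]
      have hvle : v ≤ w := hle w (List.mem_cons_self)
      have hvnotin : v ∉ rest := fun hv => hwv (le_antisymm (hw v hv) hvle)
      rw [step, ih w hw hp']
      simp [List.nodup_cons, hvnotin, Ne.symm hwv]
      tauto

-- the adjacent-equality scan on a ≤-sorted list detects exactly "has a duplicate"
lemma adjScan_none (l : List Int) (hp : l.Pairwise (· ≤ ·)) :
    (adjScan l none = true ↔ ¬ l.Nodup) := by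
  cases l with
  | nil => simp [adjScan]
  | cons v rest =>
    rcases List.pairwise_cons.mp hp with ⟨hw, hp'⟩
    have step : adjScan (v :: rest) none = adjScan rest (some v) := by simp [adjScan]
    rw [step, adjScan_some rest v hw hp']
    simp [List.nodup_cons]
    tauto

lemma repetition_eq_alt (source : List Int) : repetition source = repetition_alt source := by
  simp only [repetition, repetition_alt]
  have hd : source.foldl
      (fun d i => if d.contains i = false then d.insert i 1 else d.modify i 0 (· + 1))
      (PySem.Dict.empty : PySem.Dict Int Int)
      = source.foldl (fun d i => d.insert i (d.getD i 0 + 1)) (PySem.Dict.empty : PySem.Dict Int Int) := by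
    rw [foldA_eq source PySem.Dict.empty, ← PySem.Dict.counter_eq_foldl]
    exact (PySem.Dict.foldl_insert_getD_add_one_eq_counter source).symm
  rw [hd]
  set vals : List Int := (source.foldl (fun d i => d.insert i (d.getD i 0 + 1)) (PySem.Dict.empty : PySem.Dict Int Int)).values with hv
  have htot : vals.foldl (fun acc j => if j > 1 then acc ++ [j] else acc) []
      = vals.filter (fun v => v > 1) := by
    have := PySem.List.foldl_append_if (fun j : Int => decide (j > 1)) id vals []
    simpa using this
  rw [htot]
  set t := vals.filter (fun v => v > 1) with ht
  have hiff : adjScan (PySem.List.sorted t (fun x => x) false) none = true ↔ ¬ t.Nodup := by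
    rw [adjScan_none _ (PySem.List.sorted_pairwise t (fun x => x)),
      (PySem.List.sorted_perm t (fun x => x) false).nodup_iff]
  by_cases hnd : t.Nodup
  · have h1 : t.length = (PySem.Set.ofList t).length :=
      ((ofList_length_eq_iff_nodup t).mpr hnd).symm
    have h2 : adjScan (PySem.List.sorted t (fun x => x) false) none = false := by
      rw [← Bool.not_eq_true, hiff]; simpa using hnd
    simp [h1, h2]
  · have h1 : ¬ (t.length = (PySem.Set.ofList t).length) := by
      intro h; exact hnd ((ofList_length_eq_iff_nodup t).mp h.symm)
    rw [if_neg h1, eq_comm]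
    exact hiff.mpr hnd

-- ===== VERDICT (by name: the statement is the Claim_ definition above) =====
theorem repetition_spec : Claim_equal_repetition := by
  intro source _
  unfold Spec_repetition
  exact repetition_eq_alt source
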